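-- pv_equiv track=rewrite | github.com/jingweiwu26/Practice_code | sort_alpha_num.py | sort_alphanumeric
-- ===== SOURCE A (Python) =====
-- def sort_alphanumeric(arr):
--     size=len(arr)
--     arr=list(arr)
--     for i in range(size - 1):
--         for j in range(size - 1):
--             if arr[j] > arr[j + 1] and arr[j].isalpha() == arr[j + 1].isalpha():
--                 arr[j], arr[j + 1] = arr[j + 1], arr[j]
--     return ''.join(arr)
-- ===== SOURCE B (Python) =====
-- def sort_alphanumeric(arr):
--     out = []
--     i = 0
--     n = len(arr)
--     while i < n:
--         k = arr[i].isalpha()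
--         j = i + 1
--         while j < n and arr[j].isalpha() == k:
--             j += 1
--         out.append(''.join(sorted(arr[i:j])))
--         i = j
--     return ''.join(out)
-- ===== Notes on version B (the rewrite author's own statement) =====
-- stated objective: faster
-- what changed: Replaces the category-guarded bubble sort (n-1 full passes of adjacent swaps restricted to same-isalpha neighbours) by a single scan that splits the string into maximal same-isalpha runs and sorts each run with sorted().
import Mathlib
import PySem

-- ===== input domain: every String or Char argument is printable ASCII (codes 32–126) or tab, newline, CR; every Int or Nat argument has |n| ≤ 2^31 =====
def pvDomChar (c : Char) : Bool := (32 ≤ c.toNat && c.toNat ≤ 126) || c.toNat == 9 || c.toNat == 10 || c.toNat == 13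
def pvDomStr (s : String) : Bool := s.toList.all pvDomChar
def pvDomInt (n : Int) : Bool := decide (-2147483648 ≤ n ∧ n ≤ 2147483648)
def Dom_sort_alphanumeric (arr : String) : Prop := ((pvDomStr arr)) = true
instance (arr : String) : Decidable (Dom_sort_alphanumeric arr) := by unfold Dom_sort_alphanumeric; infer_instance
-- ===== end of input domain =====

-- B replaces A's category-guarded bubble sort by one scan into maximal same-isalpha runs,
-- each sorted with sorted(); measurably faster (O(n log n) vs O(n^2)).

-- ===== PORT A =====
-- the body of the inner loop: compare arr[j] with arr[j+1], swap if out of order and same category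
def pvSwapStep (l : List Char) (j : Int) : List Char :=
  match PySem.List.pyGet? l j, PySem.List.pyGet? l (j + 1) with
  | some a, some b =>
      if a > b ∧ PySem.Chars.isalpha a = PySem.Chars.isalpha b then
        PySem.List.pySetD (PySem.List.pySetD l j b) (j + 1) a
      else l
  | _, _ => l  -- IndexError: unreachable, j and j+1 lie in range(size)

def sort_alphanumeric (arr : String) : String :=
  let size : Int := PySem.Str.len arr
  let l := arr.toList
  let res := (PySem.List.pyRange 0 (size - 1) 1).foldl
      (fun acc _i => (PySem.List.pyRange 0 (size - 1) 1).foldl (fun acc2 j => pvSwapStep acc2 j) acc) l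
  String.ofList res  -- ''.join of the swapped characters

-- ===== PORT B =====
-- outer while loop of Source B: take the maximal run with arr[i]'s isalpha status, sort it, recurse on the rest
def sort_alphanumeric_altCore : List Char → List Char
  | [] => []
  | x :: rest =>
      let k := PySem.Chars.isalpha x
      PySem.List.sorted (x :: rest.takeWhile (fun y => PySem.Chars.isalpha y == k)) (fun c => c) false ++
        sort_alphanumeric_altCore (rest.dropWhile (fun y => PySem.Chars.isalpha y == k))
  termination_by l => l.length
  decreasing_by
    simpa using Nat.lt_succ_of_le (List.length_dropWhile_le _ _)

def sort_alphanumeric_alt (arr : String) : String :=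
  String.ofList (sort_alphanumeric_altCore arr.toList)

-- ===== PRECONDITION & SPEC =====
def Spec_sort_alphanumeric (arr : String) (out : String) : Prop := out = sort_alphanumeric_alt arr
instance (arr : String) (out : String) : Decidable (Spec_sort_alphanumeric arr out) := by unfold Spec_sort_alphanumeric; infer_instance

-- ===== CLAIM (what is proved, stated in full; the proofs are below) =====
def Claim_equal_sort_alphanumeric : Prop := ∀ (arr : String), Dom_sort_alphanumeric arr → Spec_sort_alphanumeric arr (sort_alphanumeric arr)

-- ===== LEMMAS AND PROOFS =====

-- one category-guarded bubble pass, structurally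
def pvBpass : List Char → List Char
  | x :: y :: t =>
      if x > y ∧ PySem.Chars.isalpha x = PySem.Chars.isalpha y
      then y :: pvBpass (x :: t) else x :: pvBpass (y :: t)
  | l => l
  termination_by l => l.length
  decreasing_by all_goals simp

-- one plain (unguarded) bubble pass
def pvPpass : List Char → List Char
  | x :: y :: t => if x > y then y :: pvPpass (x :: t) else x :: pvPpass (y :: t)
  | l => l
  termination_by l => l.length
  decreasing_by all_goals simp

-- the maximal same-category runs
def pvRuns : List Char → List (List Char)
  | [] => []
  | x :: rest =>
      (x :: rest.takeWhile (fun y => PySem.Chars.isalpha y == PySem.Chars.isalpha x)) ::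
        pvRuns (rest.dropWhile (fun y => PySem.Chars.isalpha y == PySem.Chars.isalpha x))
  termination_by l => l.length
  decreasing_by
    simpa using Nat.lt_succ_of_le (List.length_dropWhile_le _ _)

theorem pvPpass_perm (l : List Char) : (pvPpass l).Perm l := by
  induction l using pvPpass.induct with
  | case1 x y t h ih => rw [pvPpass, if_pos h]; exact (ih.cons y).trans (List.Perm.swap x y t)
  | case2 x y t h ih => rw [pvPpass, if_neg h]; exact ih.cons x
  | case3 l h1 =>
    rcases l with _ | ⟨a, _ | ⟨b, t⟩⟩
    · simp [pvPpass]
    · simp [pvPpass]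
    · exact absurd rfl (h1 a b t)

theorem pvBpass_perm (l : List Char) : (pvBpass l).Perm l := by
  induction l using pvBpass.induct with
  | case1 x y t h ih => rw [pvBpass, if_pos h]; exact (ih.cons y).trans (List.Perm.swap x y t)
  | case2 x y t h ih => rw [pvBpass, if_neg h]; exact ih.cons x
  | case3 l h1 =>
    rcases l with _ | ⟨a, _ | ⟨b, t⟩⟩
    · simp [pvBpass]
    · simp [pvBpass]
    · exact absurd rfl (h1 a b t)

theorem pvBpass_length (l : List Char) : (pvBpass l).length = l.length :=
  (pvBpass_perm l).length_eq

theorem pvPpass_length (l : List Char) : (pvPpass l).length = l.length :=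
  (pvPpass_perm l).length_eq

theorem pvSet_append_length (pre t : List Char) (x v : Char) :
    (pre ++ x :: t).set pre.length v = pre ++ v :: t := by
  induction pre with
  | nil => simp
  | cons p pre ih => simp [ih]

theorem pvIdxFold (rest pre : List Char) (n : Int) (hn : n = pre.length + rest.length) :
    (PySem.List.pyRange (pre.length) (n - 1) 1).foldl pvSwapStep (pre ++ rest)
      = pre ++ pvBpass rest := by
  induction rest using pvBpass.induct generalizing pre with
  | case1 x y t h ih =>
    have hlt : (pre.length : Int) < n - 1 := by simp [hn, List.length_cons]; omega
    rw [PySem.List.pyRange_one_cons hlt, List.foldl_cons]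
    have hg1 : PySem.List.pyGet? (pre ++ x :: y :: t) (pre.length : Int) = some x :=
      PySem.List.pyGet?_append_length pre (y :: t) x
    have hg2 : PySem.List.pyGet? (pre ++ x :: y :: t) ((pre.length : Int) + 1) = some y := by
      have : ((pre.length : Int) + 1) = (((pre ++ [x]).length : Int)) := by simp
      rw [this, show pre ++ x :: y :: t = (pre ++ [x]) ++ y :: t by simp]
      exact PySem.List.pyGet?_append_length (pre ++ [x]) t y
    have hstep : pvSwapStep (pre ++ x :: y :: t) (pre.length : Int) = pre ++ y :: x :: t := by
      unfold pvSwapStep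
      rw [hg1, hg2]
      dsimp only
      rw [if_pos h]
      rw [PySem.List.pySetD_natCast, pvSet_append_length]
      have : ((pre.length : Int) + 1) = (((pre ++ [y]).length : Int)) := by simp
      rw [this, PySem.List.pySetD_natCast,
        show pre ++ y :: y :: t = (pre ++ [y]) ++ y :: t by simp, pvSet_append_length]
      simp
    rw [hstep]
    have hn' : n = ((pre ++ [y]).length : Int) + ((x :: t).length : Int) := by
      simp at hn ⊢; omega
    have := ih (pre ++ [y]) hn'
    rw [show ((pre ++ [y]).length : Int) = (pre.length : Int) + 1 by simp] at this
    rw [show pre ++ y :: x :: t = (pre ++ [y]) ++ x :: t by simp, this,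
      pvBpass, if_pos h]
    simp
  | case2 x y t h ih =>
    have hlt : (pre.length : Int) < n - 1 := by simp [hn, List.length_cons]; omega
    rw [PySem.List.pyRange_one_cons hlt, List.foldl_cons]
    have hg1 : PySem.List.pyGet? (pre ++ x :: y :: t) (pre.length : Int) = some x :=
      PySem.List.pyGet?_append_length pre (y :: t) x
    have hg2 : PySem.List.pyGet? (pre ++ x :: y :: t) ((pre.length : Int) + 1) = some y := by
      have : ((pre.length : Int) + 1) = (((pre ++ [x]).length : Int)) := by simp
      rw [this, show pre ++ x :: y :: t = (pre ++ [x]) ++ y :: t by simp]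
      exact PySem.List.pyGet?_append_length (pre ++ [x]) t y
    have hstep : pvSwapStep (pre ++ x :: y :: t) (pre.length : Int) = pre ++ x :: y :: t := by
      unfold pvSwapStep
      rw [hg1, hg2]
      dsimp only
      rw [if_neg h]
    rw [hstep]
    have hn' : n = ((pre ++ [x]).length : Int) + ((y :: t).length : Int) := by
      simp at hn ⊢; omega
    have := ih (pre ++ [x]) hn'
    rw [show ((pre ++ [x]).length : Int) = (pre.length : Int) + 1 by simp] at this
    rw [show pre ++ x :: y :: t = (pre ++ [x]) ++ y :: t by simp, this,
      pvBpass, if_neg h]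
    simp
  | case3 rest h1 =>
    rcases rest with _ | ⟨a, _ | ⟨b, t⟩⟩
    · rw [PySem.List.pyRange_one_eq_nil (by simp [hn])]
      simp [pvBpass]
    · rw [PySem.List.pyRange_one_eq_nil (by simp [hn])]
      simp [pvBpass]
    · exact absurd rfl (h1 a b t)

theorem pvInnerEq (l : List Char) :
    (PySem.List.pyRange 0 ((l.length : Int) - 1) 1).foldl pvSwapStep l = pvBpass l := by
  simpa using pvIdxFold l [] (l.length : Int) (by simp)

theorem pvOuterFold (is : List Int) (m : ℕ) (l : List Char) (hl : l.length = m) :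
    is.foldl (fun acc _i => (PySem.List.pyRange 0 ((m : Int) - 1) 1).foldl pvSwapStep acc) l
      = pvBpass^[is.length] l := by
  induction is generalizing l with
  | nil => simp
  | cons i is ih =>
    rw [List.foldl_cons, List.length_cons, Function.iterate_succ_apply]
    rw [show ((m : Int)) = ((l.length : Int)) by rw [hl]] at *
    rw [pvInnerEq l]
    exact ih (pvBpass l) (by rw [pvBpass_length, hl])

-- concatenation lemma: a guarded pass never crosses a category boundary
theorem pvBpass_append (r s : List Char)
    (hconst : ∀ x ∈ r, ∀ y ∈ r, PySem.Chars.isalpha x = PySem.Chars.isalpha y)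
    (hbd : ∀ x ∈ r, ∀ y, s.head? = some y → PySem.Chars.isalpha x ≠ PySem.Chars.isalpha y) :
    pvBpass (r ++ s) = pvBpass r ++ pvBpass s := by
  induction r using pvBpass.induct with
  | case1 x y t h ih =>
    rw [List.cons_append, List.cons_append, pvBpass, if_pos h, pvBpass, if_pos h]
    rw [List.cons_append, ← List.cons_append]
    congr 1
    exact ih (fun a ha b hb => hconst a (by simp at ha ⊢; tauto) b (by simp at hb ⊢; tauto))
      (fun a ha b hb => hbd a (by simp at ha ⊢; tauto) b hb)
  | case2 x y t h ih =>
    rw [List.cons_append, List.cons_append, pvBpass, if_neg h, pvBpass, if_neg h]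
    rw [List.cons_append, ← List.cons_append]
    congr 1
    exact ih (fun a ha b hb => hconst a (by simp at ha ⊢; tauto) b (by simp at hb ⊢; tauto))
      (fun a ha b hb => hbd a (by simp at ha ⊢; tauto) b hb)
  | case3 r h1 =>
    rcases r with _ | ⟨a, _ | ⟨b, t⟩⟩
    · simp [pvBpass]
    · rcases s with _ | ⟨c, u⟩
      · simp [pvBpass]
      · rw [List.singleton_append, pvBpass,
          if_neg (by rintro ⟨-, hc⟩; exact hbd a (by simp) c rfl hc)]
        simp [pvBpass]
    · exact absurd rfl (h1 a b t)

-- on a constant-category list the guard is just the comparison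
theorem pvBpass_const (r : List Char)
    (hconst : ∀ x ∈ r, ∀ y ∈ r, PySem.Chars.isalpha x = PySem.Chars.isalpha y) :
    pvBpass r = pvPpass r := by
  induction r using pvBpass.induct with
  | case1 x y t h ih =>
    rw [pvBpass, if_pos h, pvPpass, if_pos h.1]
    congr 1
    exact ih (fun a ha b hb => hconst a (by simp at ha ⊢; tauto) b (by simp at hb ⊢; tauto))
  | case2 x y t h ih =>
    have hxy : ¬ x > y := fun hgt => h ⟨hgt, hconst x (by simp) y (by simp)⟩
    rw [pvBpass, if_neg h, pvPpass, if_neg hxy]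
    congr 1
    exact ih (fun a ha b hb => hconst a (by simp at ha ⊢; tauto) b (by simp at hb ⊢; tauto))
  | case3 r h1 =>
    rcases r with _ | ⟨a, _ | ⟨b, t⟩⟩
    · simp [pvBpass, pvPpass]
    · simp [pvBpass, pvPpass]
    · exact absurd rfl (h1 a b t)

theorem pvDropHead_not (p : Char → Bool) (l : List Char) (x : Char) (u : List Char)
    (h : l.dropWhile p = x :: u) : p x = false := by
  have h1 : l.dropWhile p ≠ [] := by simp [h]
  have := List.head_dropWhile_not p h1
  simp only [h, List.head_cons] at this
  exact this

theorem pvRun_const (x : Char) (rest : List Char) (z : Char)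
    (hz : z ∈ x :: rest.takeWhile (fun y => PySem.Chars.isalpha y == PySem.Chars.isalpha x)) :
    PySem.Chars.isalpha z = PySem.Chars.isalpha x := by
  rcases List.mem_cons.mp hz with rfl | hz
  · rfl
  · simpa using List.mem_takeWhile_imp hz

def pvGoodSegs (L : List (List Char)) : Prop :=
  (∀ r ∈ L, r ≠ []) ∧
  (∀ r ∈ L, ∀ x ∈ r, ∀ y ∈ r, PySem.Chars.isalpha x = PySem.Chars.isalpha y) ∧
  L.IsChain (fun r s => ∀ x ∈ r, ∀ y ∈ s, PySem.Chars.isalpha x ≠ PySem.Chars.isalpha y)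

theorem pvRuns_flatten (l : List Char) : (pvRuns l).flatten = l := by
  induction l using pvRuns.induct with
  | case1 => simp [pvRuns]
  | case2 x rest ih =>
    rw [pvRuns]
    simp only [List.flatten_cons, ih, List.cons_append]
    rw [List.takeWhile_append_dropWhile]

theorem pvRuns_good (l : List Char) : pvGoodSegs (pvRuns l) := by
  induction l using pvRuns.induct with
  | case1 => exact ⟨by simp [pvRuns], by simp [pvRuns], by simp [pvRuns]⟩
  | case2 x rest ih =>
    obtain ⟨ih1, ih2, ih3⟩ := ih
    rw [pvRuns]
    refine ⟨?_, ?_, ?_⟩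
    · intro r hr
      rcases List.mem_cons.mp hr with rfl | hr
      · simp
      · exact ih1 r hr
    · intro r hr a ha b hb
      rcases List.mem_cons.mp hr with rfl | hr
      · rw [pvRun_const x rest a ha, pvRun_const x rest b hb]
      · exact ih2 r hr a ha b hb
    · rcases hd : rest.dropWhile (fun y => PySem.Chars.isalpha y == PySem.Chars.isalpha x)
        with _ | ⟨x', u⟩
      · simp [pvRuns]
      · rw [hd] at ih3
        rw [pvRuns] at ih3
        rw [pvRuns]
        refine List.isChain_cons_cons.mpr ⟨?_, ih3⟩
        intro a ha b hb
        have ha' := pvRun_const x rest a ha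
        have hb' := pvRun_const x' u b hb
        have hx' : (PySem.Chars.isalpha x' == PySem.Chars.isalpha x) = false :=
          pvDropHead_not _ rest x' u hd
        rw [ha', hb']
        simp only [beq_eq_false_iff_ne, ne_eq] at hx'
        exact fun hc => hx' hc.symm

theorem pvGood_map (L : List (List Char)) (g : List Char → List Char)
    (hg : ∀ r, (g r).Perm r) (h : pvGoodSegs L) : pvGoodSegs (L.map g) := by
  obtain ⟨h1, h2, h3⟩ := h
  refine ⟨?_, ?_, ?_⟩
  · intro r hr
    obtain ⟨s, hs, rfl⟩ := List.mem_map.mp hr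
    intro hnil
    have := hg s
    rw [hnil] at this
    exact h1 s hs this.symm.eq_nil
  · intro r hr a ha b hb
    obtain ⟨s, hs, rfl⟩ := List.mem_map.mp hr
    exact h2 s hs a ((hg s).mem_iff.mp ha) b ((hg s).mem_iff.mp hb)
  · rw [List.isChain_map]
    refine h3.imp ?_
    intro a b hab x hx y hy
    exact hab x ((hg a).mem_iff.mp hx) y ((hg b).mem_iff.mp hy)

theorem pvBpass_flatten (L : List (List Char)) (h : pvGoodSegs L) :
    pvBpass L.flatten = (L.map pvPpass).flatten := by
  induction L with
  | nil => simp [pvBpass]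
  | cons r L' ih =>
    obtain ⟨h1, h2, h3⟩ := h
    rw [List.flatten_cons, List.map_cons, List.flatten_cons]
    have hbd : ∀ a ∈ r, ∀ y, L'.flatten.head? = some y →
        PySem.Chars.isalpha a ≠ PySem.Chars.isalpha y := by
      intro a ha y hy hc
      rcases L' with _ | ⟨s, L''⟩
      · simp at hy
      · rcases s with _ | ⟨z, s'⟩
        · exact h1 [] (by simp) rfl
        · simp only [List.flatten_cons, List.cons_append, List.head?_cons,
            Option.some_inj] at hy
          exact (List.isChain_cons_cons.mp h3).1 a ha y (by simp [← hy]) hc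
    rw [pvBpass_append r L'.flatten (h2 r (by simp)) hbd]
    congr 1
    · exact pvBpass_const r (h2 r (by simp))
    · refine ih ⟨fun s hs => h1 s (by simp [hs]), fun s hs => h2 s (by simp [hs]), ?_⟩
      rcases L' with _ | ⟨s, L''⟩
      · simp
      · exact (List.isChain_cons_cons.mp h3).2

theorem pvPpass_iter_perm (m : ℕ) (l : List Char) : (pvPpass^[m] l).Perm l := by
  induction m generalizing l with
  | zero => simp
  | succ m ih => rw [Function.iterate_succ_apply]; exact (ih _).trans (pvPpass_perm l)

theorem pvBpass_iter_flatten (m : ℕ) (l : List Char) :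
    pvBpass^[m] l = ((pvRuns l).map (pvPpass^[m])).flatten := by
  induction m with
  | zero => simp [pvRuns_flatten]
  | succ m ih =>
    rw [Function.iterate_succ_apply', ih,
      pvBpass_flatten _ (pvGood_map _ _ (fun r => pvPpass_iter_perm m r) (pvRuns_good l)),
      List.map_map, Function.iterate_succ']

theorem pvPpass_max (x : Char) (t : List Char) :
    ∃ u M, pvPpass (x :: t) = u ++ [M] ∧ ∀ z ∈ x :: t, z ≤ M := by
  induction t generalizing x with
  | nil => exact ⟨[], x, by simp [pvPpass], by simp⟩
  | cons y u ih =>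
    rw [pvPpass]
    by_cases hxy : x > y
    · obtain ⟨u', M, he, hb⟩ := ih x
      refine ⟨y :: u', M, by simp [hxy, he], ?_⟩
      intro z hz
      rcases List.mem_cons.mp hz with rfl | hz
      · exact hb z (by simp)
      rcases List.mem_cons.mp hz with rfl | hz
      · exact le_of_lt (lt_of_lt_of_le hxy (hb x (by simp)))
      · exact hb z (by simp [hz])
    · obtain ⟨u', M, he, hb⟩ := ih y
      refine ⟨x :: u', M, by simp [hxy, he], ?_⟩
      intro z hz
      rcases List.mem_cons.mp hz with rfl | hz
      · exact le_trans (le_of_not_gt hxy) (hb y (by simp))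
      · exact hb z (by simp at hz ⊢; tauto)

theorem pvPpass_append_max (u : List Char) (M : Char) (h : ∀ z ∈ u, z ≤ M) :
    pvPpass (u ++ [M]) = pvPpass u ++ [M] := by
  induction u using pvPpass.induct with
  | case1 x y t hxy ih =>
    rw [List.cons_append, List.cons_append, pvPpass, if_pos hxy, pvPpass, if_pos hxy]
    rw [List.cons_append, ← List.cons_append]
    congr 1
    exact ih (fun z hz => h z (by simp at hz ⊢; tauto))
  | case2 x y t hxy ih =>
    rw [List.cons_append, List.cons_append, pvPpass, if_neg hxy, pvPpass, if_neg hxy]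
    rw [List.cons_append, ← List.cons_append]
    congr 1
    exact ih (fun z hz => h z (by simp at hz ⊢; tauto))
  | case3 u h1 =>
    rcases u with _ | ⟨a, _ | ⟨b, t⟩⟩
    · simp [pvPpass]
    · rw [List.singleton_append, pvPpass, if_neg (not_lt.mpr (h a (by simp)))]
      simp [pvPpass]
    · exact absurd rfl (h1 a b t)

theorem pvPpass_iter_append_max (m : ℕ) (u : List Char) (M : Char) (h : ∀ z ∈ u, z ≤ M) :
    pvPpass^[m] (u ++ [M]) = pvPpass^[m] u ++ [M] := by
  induction m generalizing u with
  | zero => simp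
  | succ m ih =>
    rw [Function.iterate_succ_apply, Function.iterate_succ_apply,
      pvPpass_append_max u M h]
    exact ih (pvPpass u) (fun z hz => h z ((pvPpass_perm u).mem_iff.mp hz))

theorem pvPpass_iter_sorted (m : ℕ) (l : List Char) (h : l.length ≤ m + 1) :
    (pvPpass^[m] l).Pairwise (· ≤ ·) := by
  induction m generalizing l with
  | zero =>
    rcases l with _ | ⟨a, _ | ⟨b, t⟩⟩
    · simp
    · simp
    · simp at h
  | succ m ih =>
    rcases l with _ | ⟨x, t⟩
    · rw [(pvPpass_iter_perm (m + 1) []).eq_nil]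
      simp
    · rw [Function.iterate_succ_apply]
      obtain ⟨u, M, he, hb⟩ := pvPpass_max x t
      have hu : ∀ z ∈ u, z ≤ M := by
        intro z hz
        exact hb z ((pvPpass_perm (x :: t)).mem_iff.mp (he ▸ List.mem_append_left _ hz))
      rw [he, pvPpass_iter_append_max m u M hu]
      have hlen : u.length ≤ m + 1 := by
        have h1 : (pvPpass (x :: t)).length = t.length + 1 := by
          rw [pvPpass_length]; simp
        rw [he] at h1
        simp at h1 h
        omega
      refine List.pairwise_append.mpr ⟨ih u hlen, by simp, ?_⟩
      intro a ha b hb'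
      rcases List.mem_singleton.mp hb' with rfl
      exact hu a ((pvPpass_iter_perm m u).mem_iff.mp ha)

theorem pvPpass_iter_eq_sorted (m : ℕ) (l : List Char) (h : l.length ≤ m + 1) :
    pvPpass^[m] l = PySem.List.sorted l (fun c => c) false := by
  exact (PySem.List.sorted_id_eq_of_perm_of_pairwise l (pvPpass^[m] l)
    (pvPpass_iter_perm m l) (pvPpass_iter_sorted m l h)).symm

theorem pvRuns_length_le (l : List Char) (r : List Char) (hr : r ∈ pvRuns l) :
    r.length ≤ l.length := by
  conv_rhs => rw [← pvRuns_flatten l]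
  rw [List.length_flatten]
  exact List.single_le_sum (fun _ _ => Nat.zero_le _) _ (List.mem_map_of_mem hr)

theorem pvAltCore_eq (l : List Char) :
    sort_alphanumeric_altCore l
      = ((pvRuns l).map (fun r => PySem.List.sorted r (fun c => c) false)).flatten := by
  induction l using pvRuns.induct with
  | case1 => simp [pvRuns, sort_alphanumeric_altCore]
  | case2 x rest ih => rw [pvRuns, sort_alphanumeric_altCore]; simp [ih]

theorem pvMain (l : List Char) :
    pvBpass^[((l.length : Int) - 1).toNat] l = sort_alphanumeric_altCore l := by
  rw [pvAltCore_eq, pvBpass_iter_flatten]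
  congr 1
  apply List.map_congr_left
  intro r hr
  apply pvPpass_iter_eq_sorted
  have h1 := pvRuns_length_le l r hr
  rcases Nat.eq_zero_or_pos l.length with h0 | h0
  · rw [List.length_eq_zero_iff] at h0; subst h0; simp [pvRuns] at hr
  · omega

-- ===== VERDICT (by name: the statement is the Claim_ definition above) =====
theorem sort_alphanumeric_spec : Claim_equal_sort_alphanumeric := by
  intro arr _
  unfold Spec_sort_alphanumeric sort_alphanumeric sort_alphanumeric_alt
  dsimp only
  simp only [PySem.Str.len_eq]
  rw [pvOuterFold _ arr.toList.length _ rfl, PySem.List.length_pyRange_one]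
  rw [show ((arr.toList.length : Int) - 1 - 0) = ((arr.toList.length : Int) - 1) by omega]
  rw [pvMain]
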